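-- pv_equiv track=rewrite | github.com/ni851ste/psycho_stuff | src/tasks.py | item_distance
-- ===== SOURCE A (Python) =====
-- def item_distance(inlist):
--     out_dict = {}
--     range_saver_dic = {}
--     for i in range(len(inlist)):
--         element = inlist[i]
--         # not in dict
--         if element not in out_dict:
--             out_dict[element] = []
--             range_saver_dic[element] = i
--
--         # element already in dict
--         else:
--             # -1 to correct the calculation using the indices
--             distance = (i - 1) - range_saver_dic[element]
--             out_dict[element].append(distance)
--             range_saver_dic[element] = i
--
--     return out_dict
-- ===== SOURCE B (Python) =====
-- def item_distance(inlist):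
--     positions = {}
--     for i, element in enumerate(inlist):
--         positions.setdefault(element, []).append(i)
--     out = {}
--     for element, idx in positions.items():
--         out[element] = [b - a - 1 for a, b in zip(idx, idx[1:])]
--     return out
-- ===== Notes on version B (the rewrite author's own statement) =====
-- stated objective: alternative
-- what changed: B replaces A's single streaming pass with two dicts (distances-so-far plus a last-index dict) by a two-pass scheme: first group all occurrence indices per element with setdefault, then derive each gap list from consecutive index pairs via zip.
import Mathlib
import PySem

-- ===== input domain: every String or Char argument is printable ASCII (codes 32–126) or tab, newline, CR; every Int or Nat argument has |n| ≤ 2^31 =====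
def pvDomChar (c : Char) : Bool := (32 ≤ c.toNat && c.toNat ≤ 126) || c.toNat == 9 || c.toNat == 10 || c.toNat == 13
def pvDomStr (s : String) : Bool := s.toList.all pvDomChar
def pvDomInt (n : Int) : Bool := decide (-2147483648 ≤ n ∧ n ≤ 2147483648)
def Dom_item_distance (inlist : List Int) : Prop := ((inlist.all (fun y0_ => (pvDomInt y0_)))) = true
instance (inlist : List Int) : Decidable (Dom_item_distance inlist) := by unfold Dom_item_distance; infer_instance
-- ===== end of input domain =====

-- B computes the same gap dict by grouping occurrence indices first and differencing
-- consecutive pairs, instead of A's streaming pass with a last-index dict (objective: alternative).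

-- ===== PORT A =====
-- loop body of A; `range_saver_dic[element]` is read with getD 0: the else branch runs only
-- when the key is present (A inserted it together with out_dict[element]), so the default is never used
def pvStepA (st : PySem.Dict Int (List Int) × PySem.Dict Int Int) (i element : Int) :
    PySem.Dict Int (List Int) × PySem.Dict Int Int :=
  if st.1.contains element = false then
    (st.1.insert element [], st.2.insert element i)
  else
    let distance := (i - 1) - st.2.getD element 0
    (st.1.modify element [] (fun l => l ++ [distance]), st.2.insert element i)

def item_distance (inlist : List Int) : List (Int × List Int) :=
  ((PySem.List.pyRange 0 (PySem.List.len inlist) 1).foldl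
      (fun st i => pvStepA st i (PySem.List.pyGetD inlist i 0))  -- inlist[i], i always in range
      (PySem.Dict.empty, PySem.Dict.empty)).1.items

-- ===== PORT B =====
-- [b - a - 1 for a, b in zip(idx, idx[1:])]
def pvDiffs (idx : List Int) : List Int :=
  (idx.zip (idx.drop 1)).map (fun r => r.2 - r.1 - 1)

-- first pass: positions.setdefault(element, []).append(i) for i, element in enumerate(inlist)
def pvPositions (inlist : List Int) : PySem.Dict Int (List Int) :=
  (PySem.List.enumerate inlist).foldl
    (fun d q => d.modify q.2 [] (fun l => l ++ [q.1])) PySem.Dict.empty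

def item_distance_alt (inlist : List Int) : List (Int × List Int) :=
  ((pvPositions inlist).items.foldl (fun d q => d.insert q.1 (pvDiffs q.2)) PySem.Dict.empty).items

-- ===== PRECONDITION & SPEC =====
def Spec_item_distance (inlist : List Int) (out : List (Int × List Int)) : Prop := out = item_distance_alt inlist
instance (inlist : List Int) (out : List (Int × List Int)) : Decidable (Spec_item_distance inlist out) := by unfold Spec_item_distance; infer_instance

-- ===== CLAIM (what is proved, stated in full; the proofs are below) =====
def Claim_equal_item_distance : Prop := ∀ (inlist : List Int), Dom_item_distance inlist → Spec_item_distance inlist (item_distance inlist)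

-- ===== LEMMAS AND PROOFS =====

lemma pvDiffs_singleton (i : Int) : pvDiffs [i] = [] := rfl

lemma pvDiffs_append (v : List Int) (i : Int) (hv : v ≠ []) :
    pvDiffs (v ++ [i]) = pvDiffs v ++ [(i - 1) - v.getLastD 0] := by
  induction v with
  | nil => simp at hv
  | cons a t ih =>
    cases t with
    | nil => simp [pvDiffs]; ring
    | cons b u =>
      have h := ih (by simp)
      simp only [pvDiffs, List.cons_append, List.drop_succ_cons, List.drop_zero] at h ⊢
      simp only [List.zip_cons_cons, List.map_cons] at h ⊢
      simp only [List.getLastD_cons] at h ⊢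
      rw [List.cons_append, h]

-- the loop invariant: A's (out_dict, range_saver_dic) state is determined by B's positions dict
lemma pvLoop (l : List (Int × Int)) (p out : PySem.Dict Int (List Int)) (saver : PySem.Dict Int Int)
    (hnd : p.keys.Nodup)
    (H1 : out.items = p.items.map (fun kv => (kv.1, pvDiffs kv.2)))
    (H2 : ∀ k v, p.get? k = some v → v ≠ [] ∧ saver.getD k 0 = v.getLastD 0) :
    ((l.foldl (fun st q => pvStepA st q.1 q.2) (out, saver)).1).items
      = (l.foldl (fun d q => d.modify q.2 [] (fun l => l ++ [q.1])) p).items.map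
          (fun kv => (kv.1, pvDiffs kv.2)) := by
  induction l generalizing p out saver with
  | nil => simpa using H1
  | cons q l ih =>
    obtain ⟨i, x⟩ := q
    have hkeys : out.keys = p.keys := by
      simp only [PySem.Dict.keys, H1, List.map_map]
      rfl
    have hcont : out.contains x = p.contains x := by
      rw [PySem.Dict.contains_eq_decide_mem_keys, PySem.Dict.contains_eq_decide_mem_keys, hkeys]
    by_cases hc : p.contains x = true
    · -- element already present
      obtain ⟨v, hv⟩ : ∃ v, p.get? x = some v := by
        have := PySem.Dict.contains_eq_isSome_get? (d := p) (k := x)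
        rw [hc] at this
        exact Option.isSome_iff_exists.mp this.symm
      obtain ⟨hvne, hs⟩ := H2 x v hv
      have houtx : out.getD x [] = pvDiffs v := by
        have hmem : (x, v) ∈ p.items := PySem.Dict.mem_items_of_get?_eq_some p hv
        have hmem' : (x, pvDiffs v) ∈ out.items := by
          rw [H1]; exact List.mem_map.mpr ⟨(x, v), hmem, rfl⟩
        exact PySem.Dict.getD_of_mem_items out hmem' (by rw [hkeys]; exact hnd) []
      have hstep : pvStepA (out, saver) i x
          = (out.insert x (pvDiffs v ++ [(i - 1) - v.getLastD 0]), saver.insert x i) := by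
        simp [pvStepA, hcont, hc, PySem.Dict.modify, houtx, hs]
      have hB : (p.modify x [] (fun l => l ++ [i])) = p.insert x (v ++ [i]) := by
        simp [PySem.Dict.modify, PySem.Dict.getD_of_get?_eq_some p [] hv]
      simp only [List.foldl_cons, hstep, hB]
      rw [ih (p.insert x (v ++ [i])) _ _
        (by rw [PySem.Dict.keys_insert_of_contains _ _ hc]; exact hnd)
        (by
          rw [PySem.Dict.items_insert_of_contains _ _ hc,
              PySem.Dict.items_insert_of_contains _ _ (hcont.trans hc), H1,
              List.map_map, List.map_map]
          apply List.map_congr_left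
          intro kv _
          by_cases hk : kv.1 = x
          · simp [Function.comp, hk, pvDiffs_append v i hvne]
          · simp [Function.comp, hk])
        (by
          intro k w hw
          by_cases hk : k = x
          · subst hk
            rw [PySem.Dict.get?_insert_self] at hw
            injection hw with hw
            subst hw
            constructor
            · simp
            · rw [PySem.Dict.getD_insert_self]
              cases v with
              | nil => exact absurd rfl hvne
              | cons a t =>
                have hlast : (a :: (t ++ [i])).getLast? = some i := by
                  rw [← List.cons_append]; exact List.getLast?_concat
                simp [hlast]
          · rw [PySem.Dict.get?_insert_of_ne _ _ hk] at hw
            obtain ⟨h1, h2⟩ := H2 k w hw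
            exact ⟨h1, by rw [PySem.Dict.getD_insert_of_ne _ _ _ hk]; exact h2⟩)]
    · -- fresh element
      have hc' : p.contains x = false := by simpa using hc
      have hstep : pvStepA (out, saver) i x = (out.insert x [], saver.insert x i) := by
        simp [pvStepA, hcont, hc']
      have hB : (p.modify x [] (fun l => l ++ [i])) = p.insert x [i] := by
        simp [PySem.Dict.modify, PySem.Dict.getD_of_not_contains _ _ hc']
      simp only [List.foldl_cons, hstep, hB]
      rw [ih (p.insert x [i]) _ _
        (by
          rw [PySem.Dict.keys_insert_of_not_contains _ _ hc']
          have hx : x ∉ p.keys := by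
            rw [PySem.Dict.contains_eq_decide_mem_keys] at hc'
            simpa using hc'
          simp [List.nodup_append, hnd]
          exact fun a ha h => hx (h ▸ ha))
        (by
          rw [PySem.Dict.items_insert_of_not_contains _ _ hc',
              PySem.Dict.items_insert_of_not_contains _ _ (hcont.trans hc'), H1]
          simp [pvDiffs_singleton])
        (by
          intro k w hw
          by_cases hk : k = x
          · subst hk
            rw [PySem.Dict.get?_insert_self] at hw
            injection hw with hw
            subst hw
            exact ⟨by simp, by rw [PySem.Dict.getD_insert_self]; rfl⟩
          · rw [PySem.Dict.get?_insert_of_ne _ _ hk] at hw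
            obtain ⟨h1, h2⟩ := H2 k w hw
            exact ⟨h1, by rw [PySem.Dict.getD_insert_of_ne _ _ _ hk]; exact h2⟩)]

-- ===== VERDICT (by name: the statement is the Claim_ definition above) =====
theorem item_distance_spec : Claim_equal_item_distance := by
  intro inlist _
  unfold Spec_item_distance item_distance item_distance_alt pvPositions
  have hfold :
      (PySem.List.pyRange 0 (PySem.List.len inlist) 1).foldl
        (fun st i => pvStepA st i (PySem.List.pyGetD inlist i 0))
        ((PySem.Dict.empty : PySem.Dict Int (List Int)), (PySem.Dict.empty : PySem.Dict Int Int))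
      = (PySem.List.enumerate inlist).foldl (fun st q => pvStepA st q.1 q.2)
        (PySem.Dict.empty, PySem.Dict.empty) := by
    rw [PySem.List.enumerate_eq_map_pyRange inlist 0, List.foldl_map]
  rw [hfold]
  have hfresh : ∀ q ∈ ((PySem.List.enumerate inlist).foldl
      (fun d q => d.modify q.2 [] (fun l => l ++ [q.1])) PySem.Dict.empty).items,
      (PySem.Dict.empty : PySem.Dict Int (List Int)).contains q.1 = false := by
    intro q _
    exact PySem.Dict.contains_empty _
  have hnodup : (((PySem.List.enumerate inlist).foldl
      (fun d q => d.modify q.2 [] (fun l => l ++ [q.1])) PySem.Dict.empty).items.map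
        (fun (q : Int × List Int) => q.1)).Nodup := by
    exact PySem.Dict.nodup_keys_foldl_modify_key (PySem.List.enumerate inlist)
      (fun q => q.2) [] (fun _ q l => l ++ [q.1]) PySem.Dict.empty (by simp)
  have hitems :
      (((PySem.List.enumerate inlist).foldl
          (fun d q => d.modify q.2 [] (fun l => l ++ [q.1])) PySem.Dict.empty).items.foldl
        (fun d q => d.insert q.1 (pvDiffs q.2)) PySem.Dict.empty).items
      = (PySem.Dict.empty : PySem.Dict Int (List Int)).items
        ++ ((PySem.List.enumerate inlist).foldl
            (fun d q => d.modify q.2 [] (fun l => l ++ [q.1])) PySem.Dict.empty).items.map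
            (fun (q : Int × List Int) => (q.1, pvDiffs q.2)) :=
    PySem.Dict.items_foldl_insert_fresh _ (fun (q : Int × List Int) => q.1)
      (fun (q : Int × List Int) => pvDiffs q.2) _ hfresh hnodup
  rw [hitems]
  rw [show ((PySem.Dict.empty : PySem.Dict Int (List Int)).items) = [] from rfl, List.nil_append]
  exact pvLoop (PySem.List.enumerate inlist) PySem.Dict.empty PySem.Dict.empty PySem.Dict.empty
    (by simp) rfl (by intro k v hv; simp at hv)
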